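-- pv_equiv track=rewrite | github.com/DreaBettJ/stock-agent | mini_agent/cli.py | _pick_strategy_template
-- ===== SOURCE A (Python) =====
-- def _pick_strategy_template(templates: list[dict[str, str]], selector: str) -> dict[str, str] | None:
--     key = (selector or "").strip()
--     if not key:
--         return None
--     for item in templates:
--         if key == str(item.get("id")):
--             return item
--     for item in templates:
--         if key == str(item.get("name")):
--             return item
--     return None
-- ===== SOURCE B (Python) =====
-- def _pick_strategy_template(templates: list[dict[str, str]], selector: str) -> dict[str, str] | None:
--     key = (selector or "").strip()
--     if not key:
--         return None
--     fallback = None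
--     for item in templates:
--         if key == str(item.get("id")):
--             return item
--         if fallback is None and key == str(item.get("name")):
--             fallback = item
--     return fallback
-- ===== Notes on version B (the rewrite author's own statement) =====
-- stated objective: alternative
-- what changed: Replaces A's two sequential scans (id pass, then name pass) with a single pass that returns immediately on an id match and carries the first name match as a deferred fallback returned after the loop.
import Mathlib
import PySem

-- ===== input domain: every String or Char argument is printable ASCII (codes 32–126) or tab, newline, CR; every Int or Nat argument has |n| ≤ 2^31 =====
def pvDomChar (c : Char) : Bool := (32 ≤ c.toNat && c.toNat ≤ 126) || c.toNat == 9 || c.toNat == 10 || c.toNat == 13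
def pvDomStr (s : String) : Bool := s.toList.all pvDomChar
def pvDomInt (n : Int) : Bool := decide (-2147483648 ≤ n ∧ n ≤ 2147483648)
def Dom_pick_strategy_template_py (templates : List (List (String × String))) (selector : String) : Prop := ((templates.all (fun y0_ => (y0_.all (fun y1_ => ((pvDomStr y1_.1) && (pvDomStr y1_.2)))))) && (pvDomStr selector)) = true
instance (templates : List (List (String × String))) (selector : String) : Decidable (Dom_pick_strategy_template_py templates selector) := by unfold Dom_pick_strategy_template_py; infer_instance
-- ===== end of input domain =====

-- ===== PORT A =====
-- One honest line: B does a single pass with an immediate id-return and a deferred first-name fallback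
-- instead of A's two sequential scans; same O(n) cost, different decomposition.

-- str(item.get(k)): first-match lookup in the association list; Python's str(None) is "None"
def pvGetStr (item : List (String × String)) (k : String) : String :=
  match item.find? (fun p => p.1 == k) with
  | some p => p.2
  | none => "None"

def pick_strategy_template_py (templates : List (List (String × String))) (selector : String) : Option (List (String × String)) :=
  let key := PySem.Str.strip selector
  if key = "" then none
  else
    match templates.find? (fun item => key == pvGetStr item "id") with
    | some item => some item
    | none => templates.find? (fun item => key == pvGetStr item "name")

-- ===== PORT B =====
def pvAltGo (key : String) : List (List (String × String)) → Option (List (String × String)) → Option (List (String × String))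
  | [], fallback => fallback
  | item :: rest, fallback =>
    if key == pvGetStr item "id" then some item
    else pvAltGo key rest
      (if fallback.isNone && key == pvGetStr item "name" then some item else fallback)

def pick_strategy_template_py_alt (templates : List (List (String × String))) (selector : String) : Option (List (String × String)) :=
  let key := PySem.Str.strip selector
  if key = "" then none
  else pvAltGo key templates none

-- ===== PRECONDITION & SPEC =====
def Spec_pick_strategy_template_py (templates : List (List (String × String))) (selector : String) (out : Option (List (String × String))) : Prop := out = pick_strategy_template_py_alt templates selector
instance (templates : List (List (String × String))) (selector : String) (out : Option (List (String × String))) : Decidable (Spec_pick_strategy_template_py templates selector out) := by unfold Spec_pick_strategy_template_py; infer_instance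

-- ===== CLAIM (what is proved, stated in full; the proofs are below) =====
def Claim_equal_pick_strategy_template_py : Prop := ∀ (templates : List (List (String × String))) (selector : String), Dom_pick_strategy_template_py templates selector → Spec_pick_strategy_template_py templates selector (pick_strategy_template_py templates selector)

-- ===== LEMMAS AND PROOFS =====
theorem pvAltGo_eq (key : String) (ts : List (List (String × String)))
    (fb : Option (List (String × String))) :
    pvAltGo key ts fb =
      match ts.find? (fun item => key == pvGetStr item "id") with
      | some item => some item
      | none =>
        match fb with
        | some x => some x
        | none => ts.find? (fun item => key == pvGetStr item "name") := by
  induction ts generalizing fb with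
  | nil => cases fb <;> simp [pvAltGo]
  | cons item rest ih =>
    by_cases hid : (key == pvGetStr item "id") = true
    · simp [pvAltGo, List.find?, hid]
    · cases fb with
      | some x =>
        simp [pvAltGo, List.find?, hid, ih]
      | none =>
        by_cases hnm : (key == pvGetStr item "name") = true
        · simp [pvAltGo, List.find?, hid, hnm, ih]
        · simp [pvAltGo, List.find?, hid, hnm, ih]

-- ===== VERDICT (by name: the statement is the Claim_ definition above) =====
theorem pick_strategy_template_py_spec : Claim_equal_pick_strategy_template_py := by
  intro templates selector _
  unfold Spec_pick_strategy_template_py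
  unfold pick_strategy_template_py pick_strategy_template_py_alt
  by_cases h : PySem.Str.strip selector = ""
  · simp [h]
  · simp only [h, if_false, pvAltGo_eq]
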